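-- pv_equiv track=rewrite | github.com/dedekamiwada/valorant-ai-coach | valorant-coach-backend/app/services/pro_vod_analyzer.py | summarize_pro_strengths
-- ===== SOURCE A (Python) =====
-- from typing import Any
--
-- def summarize_pro_strengths(entries: list[dict[str, Any]]) -> str:
--     """Human-readable one-paragraph summary of the generated strengths,
--     used as the top-level report text returned to the UI after analysis."""
--     if not entries:
--         return (
--             "Nenhum ponto forte acima do threshold foi detectado nesta VOD. "
--             "Tente um clip mais longo ou verifique se o vídeo é de gameplay real."
--         )
--     by_cat: dict[str, int] = {}
--     for e in entries:
--         by_cat[e["category"]] = by_cat.get(e["category"], 0) + 1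
--     parts = [f"{n} em {cat}" for cat, n in sorted(by_cat.items())]
--     return (
--         f"{len(entries)} pontos fortes extraídos do VOD do pro — "
--         + ", ".join(parts)
--         + "."
--     )
-- ===== SOURCE B (Python) =====
-- def summarize_pro_strengths(entries):
--     if not entries:
--         return (
--             "Nenhum ponto forte acima do threshold foi detectado nesta VOD. "
--             "Tente um clip mais longo ou verifique se o vídeo é de gameplay real."
--         )
--     # sort the categories once, then emit one "<run length> em <cat>" per
--     # maximal run of equal values (groupby-style scan); no dict of counts.
--     rest = sorted(e["category"] for e in entries)
--     parts = []
--     while rest: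
--         c = rest[0]
--         run = 1
--         while run < len(rest) and rest[run] == c:
--             run += 1
--         parts.append(f"{run} em {c}")
--         rest = rest[run:]
--     return (
--         f"{len(entries)} pontos fortes extraídos do VOD do pro — "
--         + ", ".join(parts)
--         + "."
--     )
-- ===== Notes on version B (the rewrite author's own statement) =====
-- stated objective: alternative
-- what changed: Replaces the dict-of-counts accumulation plus sort over (category, count) pairs with a sort of the raw category list followed by a single groupby-style run-length scan that emits one part per maximal run of equal categories.
import Mathlib
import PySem

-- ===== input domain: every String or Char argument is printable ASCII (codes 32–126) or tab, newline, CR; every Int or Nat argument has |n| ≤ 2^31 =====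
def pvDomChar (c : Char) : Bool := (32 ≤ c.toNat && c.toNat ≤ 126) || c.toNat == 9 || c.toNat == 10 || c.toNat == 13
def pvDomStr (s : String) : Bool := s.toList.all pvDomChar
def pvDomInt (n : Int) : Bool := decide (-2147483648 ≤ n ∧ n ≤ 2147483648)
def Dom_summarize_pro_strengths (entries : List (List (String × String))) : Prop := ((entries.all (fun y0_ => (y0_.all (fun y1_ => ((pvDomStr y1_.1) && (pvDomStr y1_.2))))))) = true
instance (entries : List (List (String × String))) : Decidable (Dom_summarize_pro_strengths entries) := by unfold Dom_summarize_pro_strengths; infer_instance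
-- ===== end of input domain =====

-- ===== PORT A =====
-- B sorts the category list once and emits one part per maximal run of equal
-- categories (groupby-style scan) instead of A's dict-of-counts; equal output, no speed claim.
-- Shared faithful helper for the Python expression e["category"] (first-match lookup in the
-- entry's association list); total with default "" — Pre_ excludes the inputs where Python raises KeyError.
def pvCatOf (e : List (String × String)) : String :=
  ((PySem.Dict.mk e).get? "category").getD ""

def summarize_pro_strengths (entries : List (List (String × String))) : String :=
  if entries = [] then
    "Nenhum ponto forte acima do threshold foi detectado nesta VOD. Tente um clip mais longo ou verifique se o vídeo é de gameplay real."
  else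
    let by_cat : PySem.Dict String Int :=
      entries.foldl (fun d e => d.insert (pvCatOf e) (d.getD (pvCatOf e) 0 + 1)) PySem.Dict.empty
    let parts : List String :=
      (PySem.List.sorted2 by_cat.items Prod.fst Prod.snd).map
        (fun p => PySem.Int.toStr p.2 ++ " em " ++ p.1)
    PySem.Int.toStr (entries.length : Int) ++ " pontos fortes extraídos do VOD do pro — "
      ++ PySem.Str.join ", " parts ++ "."

-- ===== PORT B =====
-- The outer while loop of Source B: take a maximal run of the head value
-- (inner while = counting the matching prefix), emit its part, continue on the remainder.
def pvRuns : List String → List String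
  | [] => []
  | c :: rest =>
      (PySem.Int.toStr (((rest.takeWhile (fun x => x == c)).length + 1 : Nat) : Int) ++ " em " ++ c)
        :: pvRuns (rest.dropWhile (fun x => x == c))
termination_by l => l.length
decreasing_by
  simp only [List.length_cons]
  exact Nat.lt_succ_of_le (List.length_dropWhile_le _ _)

def summarize_pro_strengths_alt (entries : List (List (String × String))) : String :=
  if entries = [] then
    "Nenhum ponto forte acima do threshold foi detectado nesta VOD. Tente um clip mais longo ou verifique se o vídeo é de gameplay real."
  else
    let rest : List String := PySem.List.sorted (entries.map pvCatOf) (fun x => x)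
    let parts : List String := pvRuns rest
    PySem.Int.toStr (entries.length : Int) ++ " pontos fortes extraídos do VOD do pro — "
      ++ PySem.Str.join ", " parts ++ "."

-- ===== PRECONDITION & SPEC =====
-- Pre_ excludes exactly the entries lacking a "category" key, on which Python A raises KeyError.
def Pre_summarize_pro_strengths (entries : List (List (String × String))) : Prop :=
  ∀ e ∈ entries, ∃ p ∈ e, p.1 = "category"
instance (entries : List (List (String × String))) : Decidable (Pre_summarize_pro_strengths entries) := by
  unfold Pre_summarize_pro_strengths; infer_instance
def pvWitness_summarize_pro_strengths : (List (List (String × String))) :=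
  [[("category", "aim")], [("category", "util"), ("note", "x")]]
def Spec_summarize_pro_strengths (entries : List (List (String × String))) (out : String) : Prop := out = summarize_pro_strengths_alt entries
instance (entries : List (List (String × String))) (out : String) : Decidable (Spec_summarize_pro_strengths entries out) := by unfold Spec_summarize_pro_strengths; infer_instance

-- ===== CLAIM (what is proved, stated in full; the proofs are below) =====
def Claim_equal_summarize_pro_strengths : Prop := ∀ (entries : List (List (String × String))), Dom_summarize_pro_strengths entries → Pre_summarize_pro_strengths entries → Spec_summarize_pro_strengths entries (summarize_pro_strengths entries)

-- ===== LEMMAS AND PROOFS =====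

theorem pv_insertBy_congr {α : Type} (f g : α → α → Bool) (x : α) (acc : List α)
    (h : ∀ y ∈ acc, f x y = g x y) :
    PySem.List.insertBy f x acc = PySem.List.insertBy g x acc := by
  induction acc with
  | nil => rfl
  | cons y ys ih =>
    simp only [PySem.List.insertBy]
    rw [h y (by simp)]
    split
    · rfl
    · have := ih (fun z hz => h z (by simp [hz]))
      rw [this]

theorem pv_foldl_insertBy_congr {α : Type} (f g : α → α → Bool)
    (xs : List α) (acc : List α)
    (hfg : ∀ a b, (a ∈ xs ∨ a ∈ acc) → (b ∈ xs ∨ b ∈ acc) → f a b = g a b) :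
    xs.foldl (fun l x => PySem.List.insertBy f x l) acc
      = xs.foldl (fun l x => PySem.List.insertBy g x l) acc := by
  induction xs generalizing acc with
  | nil => rfl
  | cons x xs ih =>
    simp only [List.foldl_cons]
    rw [pv_insertBy_congr f g x acc
      (fun y hy => hfg x y (Or.inl (by simp)) (Or.inr hy))]
    exact ih (PySem.List.insertBy g x acc)
      (fun a b ha hb => by
        apply hfg a b
        · rcases ha with ha | ha
          · exact Or.inl (by simp [ha])
          · rcases (PySem.List.mem_insertBy g x a acc).mp ha with h | h
            · exact Or.inl (by simp [h])
            · exact Or.inr h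
        · rcases hb with hb | hb
          · exact Or.inl (by simp [hb])
          · rcases (PySem.List.mem_insertBy g x b acc).mp hb with h | h
            · exact Or.inl (by simp [h])
            · exact Or.inr h)

-- Python sorts the (category, count) pairs as tuples; with pairwise-distinct first
-- components this is the same as sorting by the first component alone.
theorem pv_sorted2_eq_sorted_of_fst_nodup (xs : List (String × Int))
    (hnd : (xs.map Prod.fst).Nodup) :
    PySem.List.sorted2 xs Prod.fst Prod.snd = PySem.List.sorted xs Prod.fst := by
  simp only [PySem.List.sorted2, PySem.List.sorted]
  apply pv_foldl_insertBy_congr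
  intro a b ha hb
  simp only [List.mem_nil_iff, or_false] at ha hb
  by_cases hab : a = b
  · subst hab; simp
  · have hfst : a.1 ≠ b.1 := fun h =>
      hab (List.inj_on_of_nodup_map hnd ha hb h)
    rcases lt_trichotomy a.1 b.1 with h | h | h
    · simp [h, not_lt.mpr (le_of_lt h)]
    · exact absurd h hfst
    · simp [not_lt.mpr (le_of_lt h), h]

-- A's parts, characterised: sorted distinct categories with their counts.
theorem pv_partsA_eq (cats : List String) :
    PySem.List.sorted2 (PySem.Dict.counter cats).items Prod.fst Prod.snd
      = (PySem.List.sorted (PySem.Set.ofList cats) (fun x => x)).map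
          (fun k => (k, (List.count k cats : Int))) := by
  rw [PySem.Dict.items_counter]
  rw [pv_sorted2_eq_sorted_of_fst_nodup _
    (by simp [List.map_map, Function.comp_def])]
  apply PySem.List.sorted_eq_of_perm_of_pairwise_lt
  · exact (PySem.List.sorted_perm _ _ _).map _
  · exact (PySem.List.sorted_ofList_pairwise_lt cats).map _ (fun {a b} h => h)

-- The heads of the runs B scans (proof-only helper, used only below the claim).
def pvRunHeads : List String → List String
  | [] => []
  | c :: rest => c :: pvRunHeads (rest.dropWhile (fun x => x == c))
termination_by l => l.length
decreasing_by
  simp only [List.length_cons]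
  exact Nat.lt_succ_of_le (List.length_dropWhile_le _ _)

theorem pv_mem_runHeads (S : List String) (x : String) : x ∈ pvRunHeads S ↔ x ∈ S := by
  induction S using pvRunHeads.induct with
  | case1 => simp [pvRunHeads]
  | case2 c rest ih =>
    rw [pvRunHeads]
    constructor
    · intro hx
      rcases List.mem_cons.mp hx with h | h
      · simp [h]
      · exact List.mem_cons.mpr (Or.inr ((List.dropWhile_sublist _).mem (ih.mp h)))
    · intro hx
      rcases List.mem_cons.mp hx with h | h
      · simp [h]
      · rw [← List.takeWhile_append_dropWhile (p := fun y => y == c) (l := rest)] at h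
        rcases List.mem_append.mp h with h2 | h2
        · have hxc := List.mem_takeWhile_imp (p := fun y => y == c) h2
          simp at hxc; simp [hxc]
        · exact List.mem_cons.mpr (Or.inr (ih.mpr h2))

-- Under sortedness, everything past the head's run is strictly greater than the head.
theorem pv_dropWhile_gt (c : String) (rest : List String)
    (h : (c :: rest).Pairwise (· ≤ ·)) :
    ∀ x ∈ rest.dropWhile (fun y => y == c), c < x := by
  intro x hx
  have hsub : (rest.dropWhile (fun y => y == c)).Sublist rest := List.dropWhile_sublist _
  have hle : ∀ y ∈ rest, c ≤ y := (List.pairwise_cons.mp h).1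
  cases hdd : rest.dropWhile (fun y => y == c) with
  | nil => rw [hdd] at hx; simp at hx
  | cons a t =>
    have hne : ¬ (a == c) = true := by
      have := List.head?_dropWhile_not (fun y => y == c) rest
      rw [hdd] at this; simpa using this
    have hca : c < a := lt_of_le_of_ne
      (hle a (hsub.mem (hdd ▸ List.mem_cons_self)))
      (fun e => hne (by simp [e]))
    rw [hdd] at hx
    rcases List.mem_cons.mp hx with rfl | hxt
    · exact hca
    · have hpd : (a :: t).Pairwise (· ≤ ·) :=
        hdd ▸ ((List.pairwise_cons.mp h).2).sublist hsub
      exact lt_of_lt_of_le hca ((List.pairwise_cons.mp hpd).1 x hxt)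

theorem pv_runHeads_pairwise_lt (S : List String) (h : S.Pairwise (· ≤ ·)) :
    (pvRunHeads S).Pairwise (· < ·) := by
  induction S using pvRunHeads.induct with
  | case1 => simp [pvRunHeads]
  | case2 c rest ih =>
    rw [pvRunHeads]
    refine List.pairwise_cons.mpr ⟨fun y hy => ?_, ?_⟩
    · exact pv_dropWhile_gt c rest h y ((pv_mem_runHeads _ y).mp hy)
    · exact ih (((List.pairwise_cons.mp h).2).sublist (List.dropWhile_sublist _))

-- B's run lengths are exactly the multiplicities in the sorted list.
theorem pv_runs_eq (S : List String) (h : S.Pairwise (· ≤ ·)) :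
    pvRuns S = (pvRunHeads S).map
      (fun k => PySem.Int.toStr ((List.count k S : Nat) : Int) ++ " em " ++ k) := by
  induction S using pvRunHeads.induct with
  | case1 => simp [pvRuns, pvRunHeads]
  | case2 c rest ih =>
    have hd := pv_dropWhile_gt c rest h
    have hpd : (rest.dropWhile (fun y => y == c)).Pairwise (· ≤ ·) :=
      ((List.pairwise_cons.mp h).2).sublist (List.dropWhile_sublist _)
    have hsplit : rest = rest.takeWhile (fun y => y == c) ++ rest.dropWhile (fun y => y == c) :=
      (List.takeWhile_append_dropWhile).symm
    rw [pvRuns, pvRunHeads, List.map_cons, ih hpd]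
    congr 1
    · -- head part: the run length is the count of c in c :: rest
      have h1 : List.count c (rest.takeWhile (fun y => y == c))
          = (rest.takeWhile (fun y => y == c)).length := by
        rw [List.count_eq_length]
        intro b hb
        have hbc := List.mem_takeWhile_imp (p := fun y => y == c) hb
        simp at hbc; simp [hbc]
      have h2 : List.count c (rest.dropWhile (fun y => y == c)) = 0 := by
        rw [List.count_eq_zero]
        intro hc
        exact absurd (hd c hc) (lt_irrefl c)
      have hcount : List.count c (c :: rest) = (rest.takeWhile (fun y => y == c)).length + 1 := by
        rw [List.count_cons_self]
        conv_lhs => rw [hsplit]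
        rw [List.count_append, h1, h2]
      rw [hcount]
    · -- tail part: later keys do not occur in the head's run
      apply List.map_congr_left
      intro k hk
      have hkd : k ∈ rest.dropWhile (fun y => y == c) := (pv_mem_runHeads _ k).mp hk
      have hck : c < k := hd k hkd
      have hkt : List.count k (rest.takeWhile (fun y => y == c)) = 0 := by
        rw [List.count_eq_zero]
        intro hmem
        have hkc := List.mem_takeWhile_imp (p := fun y => y == c) hmem
        simp at hkc
        exact absurd (hkc ▸ hck) (lt_irrefl _)
      have : List.count k (c :: rest) = List.count k (rest.dropWhile (fun y => y == c)) := by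
        rw [List.count_cons_of_ne (fun e => absurd (e ▸ hck) (lt_irrefl _))]
        conv_lhs => rw [hsplit]
        rw [List.count_append, hkt, Nat.zero_add]
      rw [this]

-- ===== VERDICT (by name: the statement is the Claim_ definition above) =====
theorem summarize_pro_strengths_spec : Claim_equal_summarize_pro_strengths := by
  intro entries _hdom _hpre
  unfold Spec_summarize_pro_strengths summarize_pro_strengths summarize_pro_strengths_alt
  by_cases h : entries = []
  · simp [h]
  · simp only [h, if_false]
    congr 2
    rw [← List.foldl_map (f := pvCatOf)
      (g := fun (d : PySem.Dict String Int) x => d.insert x (d.getD x 0 + 1))]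
    rw [PySem.Dict.foldl_insert_getD_add_one_eq_counter]
    rw [pv_partsA_eq, List.map_map]
    have hpair : (PySem.List.sorted (entries.map pvCatOf) (fun x => x)).Pairwise (· ≤ ·) :=
      PySem.List.sorted_pairwise _ _
    rw [pv_runs_eq _ hpair]
    have hperm := PySem.List.sorted_perm (entries.map pvCatOf) (fun x => x) false
    have hheads : PySem.List.sorted (PySem.Set.ofList (entries.map pvCatOf)) (fun x => x)
        = pvRunHeads (PySem.List.sorted (entries.map pvCatOf) (fun x => x)) := by
      apply PySem.List.sorted_eq_of_perm_of_pairwise_lt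
      · rw [List.perm_ext_iff_of_nodup
          ((pv_runHeads_pairwise_lt _ hpair).imp ne_of_lt)
          (PySem.Set.nodup_ofList _)]
        intro a
        rw [pv_mem_runHeads, PySem.List.mem_sorted, PySem.Set.mem_ofList]
      · exact pv_runHeads_pairwise_lt _ hpair
    rw [hheads]
    congr 1
    apply List.map_congr_left
    intro k hk
    simp only [Function.comp_def]
    rw [hperm.count_eq k]
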